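-- pv_equiv track=rewrite | github.com/jinwoohg/py_algo | implement2.py | time
-- ===== SOURCE A (Python) =====
-- def time(hours):
--     minutes = [str(i) for i in range(60)]
--     seconds = [str(i) for i in range(60)]
--     threes = 0
--     hours = hours[1]
--     for hour in range(int(hours)+1):
--         for minute in minutes:
--             for second in seconds:
--                 if ('3' in second) or ('3' in minute) or ('3' in str(hour)):
--                     threes+=1
--
--     return threes
-- ===== SOURCE B (Python) =====
-- def time(hours):
--     # Per-hour closed form: every (minute, second) pair counts when the hour
--     # string contains '3' (3600 pairs); otherwise only pairs where minute or
--     # second contains '3' count: 3600 - 45*45 = 1575.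
--     h = hours[1]
--     total = 0
--     for hour in range(h + 1):
--         total += 3600 if '3' in str(hour) else 1575
--     return total
-- ===== Notes on version B (the rewrite author's own statement) =====
-- stated objective: faster
-- what changed: Replaces the 3600-iteration inner minute/second double loop with a per-hour O(1) closed form (3600 if the hour string contains '3', else 1575), keeping only the loop over hours.
import Mathlib
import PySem

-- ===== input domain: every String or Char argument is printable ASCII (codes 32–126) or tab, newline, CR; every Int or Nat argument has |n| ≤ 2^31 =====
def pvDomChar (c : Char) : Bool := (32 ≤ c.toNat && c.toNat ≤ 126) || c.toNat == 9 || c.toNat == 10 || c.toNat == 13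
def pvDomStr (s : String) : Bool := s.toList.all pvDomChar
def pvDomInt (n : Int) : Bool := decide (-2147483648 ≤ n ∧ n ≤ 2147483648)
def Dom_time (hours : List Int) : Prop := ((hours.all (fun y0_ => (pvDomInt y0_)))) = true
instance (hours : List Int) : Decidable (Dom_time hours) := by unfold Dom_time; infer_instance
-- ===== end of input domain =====

-- B replaces A's 3600-iteration inner minute/second double loop with a per-hour
-- closed form (3600 if the hour's decimal string contains '3', else 1575).

-- ===== PORT A =====
-- minutes = seconds = [str(i) for i in range(60)]
def pvMS : List String := (PySem.List.pyRange 0 60 1).map PySem.Int.toStr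

def time (hours : List Int) : Int :=
  match PySem.List.pyGet? hours 1 with
  | none => 0          -- indexing item 1 raises IndexError; excluded by Pre_time
  | some h =>          -- int(hours) on an int is the identity
    (PySem.List.pyRange 0 (h + 1) 1).foldl (fun threes hour =>
      pvMS.foldl (fun threes minute =>
        pvMS.foldl (fun threes second =>
          if PySem.Str.isIn "3" second || PySem.Str.isIn "3" minute
              || PySem.Str.isIn "3" (PySem.Int.toStr hour)
          then threes + 1 else threes) threes) threes) 0

-- ===== PORT B =====
def time_alt (hours : List Int) : Int :=
  match PySem.List.pyGet? hours 1 with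
  | none => 0          -- indexing item 1 raises IndexError; excluded by Pre_time
  | some h =>
    (PySem.List.pyRange 0 (h + 1) 1).foldl (fun total hour =>
      total + (if PySem.Str.isIn "3" (PySem.Int.toStr hour) then 3600 else 1575)) 0

-- ===== PRECONDITION & SPEC =====
-- Pre_ excludes lists of fewer than two elements, on which Python indexing item 1 raises IndexError.
def Pre_time (hours : List Int) : Prop := 2 ≤ hours.length
instance (hours : List Int) : Decidable (Pre_time hours) := by unfold Pre_time; infer_instance
def pvWitness_time : List Int := [0, 5]

def Spec_time (hours : List Int) (out : Int) : Prop := out = time_alt hours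
instance (hours : List Int) (out : Int) : Decidable (Spec_time hours out) := by unfold Spec_time; infer_instance

-- ===== CLAIM (what is proved, stated in full; the proofs are below) =====
def Claim_equal_time : Prop := ∀ (hours : List Int), Dom_time hours → Pre_time hours → Spec_time hours (time hours)

-- ===== LEMMAS AND PROOFS =====

-- one pass of A's two inner loops adds exactly B's per-hour constant
theorem pvHourStep (hs : String) (acc : Int) :
    pvMS.foldl (fun threes minute =>
      pvMS.foldl (fun threes second =>
        if PySem.Str.isIn "3" second || PySem.Str.isIn "3" minute || PySem.Str.isIn "3" hs
        then threes + 1 else threes) threes) acc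
    = acc + (if PySem.Str.isIn "3" hs then 3600 else 1575) := by
  by_cases hc : PySem.Str.isIn "3" hs = true
  · simp only [hc, Bool.or_true, if_true]
    have hin : ∀ a : Int, pvMS.foldl (fun threes (_ : String) => threes + 1) a = a + 60 := by
      intro a
      rw [PySem.List.foldl_add (g := fun _ => (1 : Int))]
      have : ((pvMS.map fun _ => (1 : Int)).sum) = 60 := by decide
      omega
    calc pvMS.foldl (fun t (_ : String) => pvMS.foldl (fun t (_ : String) => t + 1) t) acc
        = pvMS.foldl (fun t (_ : String) => t + 60) acc := by
          apply PySem.List.foldl_congr_mem; intro t m _; exact hin t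
      _ = acc + 3600 := by
          rw [PySem.List.foldl_add (g := fun _ => (60 : Int))]
          have : ((pvMS.map fun _ => (60 : Int)).sum) = 3600 := by decide
          omega
  · simp only [hc, Bool.or_false]
    have hin : ∀ (a : Int) (m : String),
        pvMS.foldl (fun t s => if PySem.Str.isIn "3" s || PySem.Str.isIn "3" m then t + 1 else t) a
        = a + (pvMS.countP (fun s => PySem.Str.isIn "3" s || PySem.Str.isIn "3" m) : Int) := by
      intro a m; exact PySem.List.foldl_if_add_one _ _ _
    calc pvMS.foldl (fun t m =>
            pvMS.foldl (fun t s => if PySem.Str.isIn "3" s || PySem.Str.isIn "3" m then t + 1 else t) t) acc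
        = pvMS.foldl (fun t m =>
            t + (pvMS.countP (fun s => PySem.Str.isIn "3" s || PySem.Str.isIn "3" m) : Int)) acc := by
          apply PySem.List.foldl_congr_mem; intro t m _; exact hin t m
      _ = acc + 1575 := by
          rw [PySem.List.foldl_add]
          have : ((pvMS.map fun m =>
              ((pvMS.countP fun s => PySem.Str.isIn "3" s || PySem.Str.isIn "3" m : Nat) : Int)).sum) = 1575 := by
            decide
          omega

theorem pvFoldEq (L : List Int) (acc : Int) :
    L.foldl (fun threes hour =>
      pvMS.foldl (fun threes minute =>
        pvMS.foldl (fun threes second =>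
          if PySem.Str.isIn "3" second || PySem.Str.isIn "3" minute
              || PySem.Str.isIn "3" (PySem.Int.toStr hour)
          then threes + 1 else threes) threes) threes) acc
    = L.foldl (fun total hour =>
        total + (if PySem.Str.isIn "3" (PySem.Int.toStr hour) then 3600 else 1575)) acc := by
  induction L generalizing acc with
  | nil => rfl
  | cons h t ih => rw [List.foldl_cons, List.foldl_cons, pvHourStep]; exact ih _

-- ===== VERDICT (by name: the statement is the Claim_ definition above) =====
theorem time_spec : Claim_equal_time := by
  intro hours _ _
  unfold Spec_time time time_alt
  cases PySem.List.pyGet? hours 1 with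
  | none => rfl
  | some h => exact pvFoldEq _ 0
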